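-- pv_equiv track=rewrite | github.com/nareshkumar-boga/security_controls_crosswalk | src/gap_analysis.py | find_unmapped_source_controls
-- ===== SOURCE A (Python) =====
-- from typing import Any, Dict, List
--
-- def find_unmapped_source_controls(
--     source_controls: List[Dict[str, Any]], mappings: List[Dict[str, Any]]
-- ) -> List[Dict[str, Any]]:
--     """Return source controls that do not appear in any mapping."""
--     mapped_source_ids = {mapping["source_control_id"] for mapping in mappings}
--     return [
--         control
--         for control in source_controls
--         if control["control_id"] not in mapped_source_ids
--     ]
-- ===== SOURCE B (Python) =====
-- from typing import Any, Dict, List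
--
-- def find_unmapped_source_controls(
--     source_controls: List[Dict[str, Any]], mappings: List[Dict[str, Any]]
-- ) -> List[Dict[str, Any]]:
--     """Return source controls that do not appear in any mapping.
--
--     Successive-elimination: pair each control with its id, then sweep the
--     mappings, each pass deleting every still-remaining control whose id the
--     current mapping maps; what survives all sweeps is unmapped."""
--     remaining = [(control["control_id"], control) for control in source_controls]
--     for mapping in mappings:
--         sid = mapping["source_control_id"]
--         remaining = [(cid, control) for (cid, control) in remaining if cid != sid]
--     return [control for (_, control) in remaining]
-- ===== Notes on version B (the rewrite author's own statement) =====
-- stated objective: alternative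
-- what changed: Instead of building an index of mapped ids and filtering controls against it, B works by successive elimination: it pairs controls with their ids and then iterates over the mappings, each mapping deleting the still-remaining controls it maps, returning the survivors in order.
import Mathlib
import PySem

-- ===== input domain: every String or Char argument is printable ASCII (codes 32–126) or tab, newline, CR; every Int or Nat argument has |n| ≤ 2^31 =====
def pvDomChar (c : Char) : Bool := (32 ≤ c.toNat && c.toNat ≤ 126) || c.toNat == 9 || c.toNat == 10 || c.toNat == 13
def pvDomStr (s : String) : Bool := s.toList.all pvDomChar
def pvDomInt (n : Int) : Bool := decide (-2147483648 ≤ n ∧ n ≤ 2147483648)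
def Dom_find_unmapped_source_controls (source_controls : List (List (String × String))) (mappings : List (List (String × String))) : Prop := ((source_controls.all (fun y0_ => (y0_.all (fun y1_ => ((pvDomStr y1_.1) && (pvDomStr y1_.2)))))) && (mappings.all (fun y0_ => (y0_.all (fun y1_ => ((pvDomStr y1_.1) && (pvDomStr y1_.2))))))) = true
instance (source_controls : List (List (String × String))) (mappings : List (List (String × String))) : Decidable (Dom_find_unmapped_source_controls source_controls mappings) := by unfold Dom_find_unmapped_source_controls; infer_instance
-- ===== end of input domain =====

-- B replaces A's "build an id-set, then filter" with successive elimination: each mapping deletes the remaining controls it maps (alternative decomposition, same result).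

-- ===== PORT A =====
-- d["k"] on an assoc-list dict is the first match: List.lookup (exact; dict keys are unique in insertion order).
-- A: build the set of mapping["source_control_id"] values, then keep controls whose "control_id" is not in it.
def find_unmapped_source_controls (source_controls : List (List (String × String))) (mappings : List (List (String × String))) : List (List (String × String)) :=
  let mapped_source_ids : PySem.Set (Option String) :=
    PySem.Set.ofList (mappings.map (fun mapping => List.lookup "source_control_id" mapping))
  source_controls.filter (fun control =>
    !(PySem.Set.contains mapped_source_ids (List.lookup "control_id" control)))

-- ===== PORT B =====
-- B: pair each control with its id; each mapping in turn deletes the remaining controls it maps; return survivors.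
def find_unmapped_source_controls_alt (source_controls : List (List (String × String))) (mappings : List (List (String × String))) : List (List (String × String)) :=
  let remaining0 : List (Option String × List (String × String)) :=
    source_controls.map (fun control => (List.lookup "control_id" control, control))
  let remaining :=
    mappings.foldl (fun rem mapping =>
      let sid := List.lookup "source_control_id" mapping
      rem.filter (fun p => p.1 != sid)) remaining0
  remaining.map (fun p => p.2)

-- ===== PRECONDITION & SPEC =====
-- Pre_ excludes exactly the inputs where Python A raises KeyError: a mapping without key
-- "source_control_id" or a source control without key "control_id".
def Pre_find_unmapped_source_controls (source_controls : List (List (String × String))) (mappings : List (List (String × String))) : Prop :=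
  (∀ m ∈ mappings, (List.lookup "source_control_id" m).isSome) ∧
  (∀ c ∈ source_controls, (List.lookup "control_id" c).isSome)
instance (source_controls : List (List (String × String))) (mappings : List (List (String × String))) : Decidable (Pre_find_unmapped_source_controls source_controls mappings) := by unfold Pre_find_unmapped_source_controls; infer_instance

def pvWitness_find_unmapped_source_controls : (List (List (String × String))) × (List (List (String × String))) :=
  ([[("control_id", "c1")], [("control_id", "c2")]], [[("source_control_id", "c1")]])

def Spec_find_unmapped_source_controls (source_controls : List (List (String × String))) (mappings : List (List (String × String))) (out : List (List (String × String))) : Prop := out = find_unmapped_source_controls_alt source_controls mappings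
instance (source_controls : List (List (String × String))) (mappings : List (List (String × String))) (out : List (List (String × String))) : Decidable (Spec_find_unmapped_source_controls source_controls mappings out) := by unfold Spec_find_unmapped_source_controls; infer_instance

-- ===== CLAIM (what is proved, stated in full; the proofs are below) =====
def Claim_equal_find_unmapped_source_controls : Prop := ∀ (source_controls : List (List (String × String))) (mappings : List (List (String × String))), Dom_find_unmapped_source_controls source_controls mappings → Pre_find_unmapped_source_controls source_controls mappings → Spec_find_unmapped_source_controls source_controls mappings (find_unmapped_source_controls source_controls mappings)

-- ===== LEMMAS AND PROOFS =====

-- folding the per-mapping deletions = one filter by "no mapping maps this id"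
theorem pv_fold_filter (mappings : List (List (String × String)))
    (rem : List (Option String × List (String × String))) :
    mappings.foldl (fun rem mapping =>
        rem.filter (fun p => p.1 != List.lookup "source_control_id" mapping)) rem
      = rem.filter (fun p =>
          !(mappings.any (fun m => List.lookup "source_control_id" m == p.1))) := by
  induction mappings generalizing rem with
  | nil => simp
  | cons m ms ih =>
    simp only [List.foldl_cons, ih, List.filter_filter]
    refine List.filter_congr (fun p _ => ?_)
    simp only [List.any_cons, Bool.not_or]
    rw [Bool.and_comm]
    congr 1
    rw [Bool.eq_iff_iff]
    simp only [bne_iff_ne, ne_eq, Bool.not_eq_true', beq_eq_false_iff_ne]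
    exact ne_comm

-- membership in A's set of mapped ids ↔ some mapping maps that id
theorem pv_contains_eq_any (mappings : List (List (String × String))) (x : Option String) :
    PySem.Set.contains (PySem.Set.ofList (mappings.map (fun m => List.lookup "source_control_id" m))) x
      = mappings.any (fun m => List.lookup "source_control_id" m == x) := by
  rw [Bool.eq_iff_iff]
  simp only [PySem.Set.contains, List.contains_iff_mem, PySem.Set.mem_ofList, List.mem_map,
    List.any_eq_true, beq_iff_eq]

-- filter after pairing = pairing after filter on the underlying controls
theorem pv_map_filter_map (source_controls : List (List (String × String)))
    (q : Option String → Bool) :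
    (((source_controls.map (fun c => (List.lookup "control_id" c, c))).filter
        (fun p => q p.1)).map (fun p => p.2))
      = source_controls.filter (fun c => q (List.lookup "control_id" c)) := by
  induction source_controls with
  | nil => rfl
  | cons c cs ih =>
    simp only [List.map_cons, List.filter_cons]
    by_cases h : q (List.lookup "control_id" c) <;> simp [h, ih]

-- ===== VERDICT (by name: the statement is the Claim_ definition above) =====
theorem find_unmapped_source_controls_spec : Claim_equal_find_unmapped_source_controls := by
  intro source_controls mappings _ _
  unfold Spec_find_unmapped_source_controls find_unmapped_source_controls find_unmapped_source_controls_alt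
  simp only []
  rw [pv_fold_filter, pv_map_filter_map source_controls
      (fun x => !(mappings.any (fun m => List.lookup "source_control_id" m == x)))]
  exact List.filter_congr (fun c _ => by rw [pv_contains_eq_any])
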